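-- pv_equiv track=rewrite | github.com/MattB543/textpress-matt-test | backend/app/main.py | generate_tab_buttons
-- ===== SOURCE A (Python) =====
-- def _escape_html(text: str) -> str:
--     text = text or ""
--     return (
--         text.replace("&", "&amp;")
--         .replace("<", "&lt;")
--         .replace(">", "&gt;")
--         .replace('"', "&quot;")
--         .replace("'", "&#39;")
--     )
--
-- def generate_tab_buttons(doc_ids: list[str], titles: list[str]) -> str:
--     buttons: list[str] = []
--     for i, (doc_id, title) in enumerate(zip(doc_ids, titles)):
--         safe_title = _escape_html(title)
--         active_class = " active" if i == 0 else ""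
--         buttons.append(
--             f'<button class="tab-btn{active_class}" data-doc-id="{doc_id}" aria-selected="{str(i==0).lower()}">{safe_title}</button>'
--         )
--     return "\n".join(buttons)
-- ===== SOURCE B (Python) =====
-- _ESC = {'&': '&amp;', '<': '&lt;', '>': '&gt;', '"': '&quot;', "'": '&#39;'}
--
--
-- def _escape_html_fast(text):
--     return ''.join(_ESC.get(ch, ch) for ch in (text or ''))
--
--
-- def generate_tab_buttons(doc_ids, titles):
--     return '\n'.join(
--         f'<button class="tab-btn{" active" if i == 0 else ""}" data-doc-id="{doc_id}"'
--         f' aria-selected="{"true" if i == 0 else "false"}">{_escape_html_fast(title)}</button>'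
--         for i, (doc_id, title) in enumerate(zip(doc_ids, titles))
--     )
-- ===== Notes on version B (the rewrite author's own statement) =====
-- stated objective: idiomatic
-- what changed: The five chained .replace() passes of _escape_html are replaced by a single pass over the characters with an escape dictionary (''.join(_ESC.get(ch, ch) ...)), and the button list is built by a generator over enumerate(zip(...)) fed straight to '\n'.join instead of an append-accumulator loop.
import Mathlib
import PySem

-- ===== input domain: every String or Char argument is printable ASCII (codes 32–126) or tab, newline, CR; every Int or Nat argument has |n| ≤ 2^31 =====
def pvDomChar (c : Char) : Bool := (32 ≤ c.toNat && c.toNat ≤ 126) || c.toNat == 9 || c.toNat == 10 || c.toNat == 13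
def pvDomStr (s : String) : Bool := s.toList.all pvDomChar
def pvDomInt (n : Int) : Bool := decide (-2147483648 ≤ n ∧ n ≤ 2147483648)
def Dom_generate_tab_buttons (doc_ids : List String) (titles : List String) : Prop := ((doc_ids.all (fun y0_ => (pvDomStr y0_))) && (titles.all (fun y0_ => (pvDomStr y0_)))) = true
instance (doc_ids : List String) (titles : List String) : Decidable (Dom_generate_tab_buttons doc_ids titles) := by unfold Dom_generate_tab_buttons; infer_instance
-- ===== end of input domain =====

-- B replaces A's five chained .replace() escape passes by a single pass over the
-- characters with an escape dictionary, and builds the buttons with a map instead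
-- of an append-accumulator loop (objective: idiomatic / single-pass escaping).

-- ===== PORT A =====
-- _escape_html: five chained .replace() passes (the `text or ""` guard is the
-- identity on Lean Strings: an empty string is already "")
def pvEscapeHtml (text : String) : String :=
  PySem.Str.replace
    (PySem.Str.replace
      (PySem.Str.replace
        (PySem.Str.replace
          (PySem.Str.replace text "&" "&amp;")
          "<" "&lt;")
        ">" "&gt;")
      "\"" "&quot;")
    "'" "&#39;"

def generate_tab_buttons (doc_ids : List String) (titles : List String) : String :=
  let buttons : List String :=
    (PySem.List.enumerate (doc_ids.zip titles)).foldl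
      (fun acc x =>
        let safe_title := pvEscapeHtml x.2.2
        let active_class := if x.1 = 0 then " active" else ""
        acc ++ ["<button class=\"tab-btn" ++ active_class ++ "\" data-doc-id=\"" ++ x.2.1
                ++ "\" aria-selected=\"" ++ (if x.1 = 0 then "true" else "false") ++ "\">"
                ++ safe_title ++ "</button>"]) []
  PySem.Str.join "\n" buttons

-- ===== PORT B =====
def pvEscDict : PySem.Dict Char String :=
  PySem.Dict.mk [('&', "&amp;"), ('<', "&lt;"), ('>', "&gt;"), ('"', "&quot;"), ('\'', "&#39;")]

-- _escape_html_fast: one pass, ''.join(_ESC.get(ch, ch) for ch in text)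
def pvEscapeHtmlFast (text : String) : String :=
  PySem.Str.join "" (text.toList.map (fun ch => PySem.Dict.getD pvEscDict ch (String.ofList [ch])))

def generate_tab_buttons_alt (doc_ids : List String) (titles : List String) : String :=
  PySem.Str.join "\n"
    ((PySem.List.enumerate (doc_ids.zip titles)).map
      (fun x =>
        "<button class=\"tab-btn" ++ (if x.1 = 0 then " active" else "") ++ "\" data-doc-id=\"" ++ x.2.1
          ++ "\" aria-selected=\"" ++ (if x.1 = 0 then "true" else "false") ++ "\">"
          ++ pvEscapeHtmlFast x.2.2 ++ "</button>"))

-- ===== PRECONDITION & SPEC =====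
def Spec_generate_tab_buttons (doc_ids : List String) (titles : List String) (out : String) : Prop := out = generate_tab_buttons_alt doc_ids titles
instance (doc_ids : List String) (titles : List String) (out : String) : Decidable (Spec_generate_tab_buttons doc_ids titles out) := by unfold Spec_generate_tab_buttons; infer_instance

-- ===== CLAIM (what is proved, stated in full; the proofs are below) =====
def Claim_equal_generate_tab_buttons : Prop := ∀ (doc_ids : List String) (titles : List String), Dom_generate_tab_buttons doc_ids titles → Spec_generate_tab_buttons doc_ids titles (generate_tab_buttons doc_ids titles)

-- ===== LEMMAS AND PROOFS =====

-- the per-character escape both escapers compute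
def pvEscChar (c : Char) : List Char :=
  if c = '&' then "&amp;".toList
  else if c = '<' then "&lt;".toList
  else if c = '>' then "&gt;".toList
  else if c = '"' then "&quot;".toList
  else if c = '\'' then "&#39;".toList
  else [c]

-- replace with a single-character pattern is a per-character flatMap
lemma replace_go_single (p : Char) (new : List Char) :
    ∀ (cs acc : List Char),
      PySem.Chars.replace.go [p] new cs.length cs acc
        = acc.reverse ++ cs.flatMap (fun c => if c = p then new else [c]) := by
  intro cs
  induction cs with
  | nil => intro acc; simp [PySem.Chars.replace.go]
  | cons c t ih =>
    intro acc
    by_cases h : c = p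
    · subst h
      simp [PySem.Chars.replace.go, List.isPrefixOf, ih]
    · have hpre : [p].isPrefixOf (c :: t) = false := by
        simp [List.isPrefixOf]
        intro hcp; exact h (by simpa using hcp.symm)
      simp [PySem.Chars.replace.go, hpre, ih, h]

lemma replace_single (cs : List Char) (p : Char) (new : List Char) :
    PySem.Chars.replace cs [p] new = cs.flatMap (fun c => if c = p then new else [c]) := by
  simpa using replace_go_single p new cs []

-- one step of the chain past a single character
lemma esc_chain_char (c : Char) :
    (((((if c = '&' then "&amp;".toList else [c]).flatMap
        (fun c => if c = '<' then "&lt;".toList else [c])).flatMap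
        (fun c => if c = '>' then "&gt;".toList else [c])).flatMap
        (fun c => if c = '"' then "&quot;".toList else [c])).flatMap
        (fun c => if c = '\'' then "&#39;".toList else [c])) = pvEscChar c := by
  by_cases h1 : c = '&'
  · subst h1; decide
  by_cases h2 : c = '<'
  · subst h2; decide
  by_cases h3 : c = '>'
  · subst h3; decide
  by_cases h4 : c = '"'
  · subst h4; decide
  by_cases h5 : c = '\''
  · subst h5; decide
  simp [pvEscChar, h1, h2, h3, h4, h5]

lemma chain_eq (cs : List Char) :
    (((((cs.flatMap (fun c => if c = '&' then "&amp;".toList else [c])).flatMap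
        (fun c => if c = '<' then "&lt;".toList else [c])).flatMap
        (fun c => if c = '>' then "&gt;".toList else [c])).flatMap
        (fun c => if c = '"' then "&quot;".toList else [c])).flatMap
        (fun c => if c = '\'' then "&#39;".toList else [c])) = cs.flatMap pvEscChar := by
  induction cs with
  | nil => simp
  | cons c t ih =>
    simp only [List.flatMap_cons, List.flatMap_append, ih]
    rw [esc_chain_char]

lemma escA_toList (t : String) :
    (pvEscapeHtml t).toList = t.toList.flatMap pvEscChar := by
  simp only [pvEscapeHtml, PySem.Str.toList_replace,
    show "&".toList = ['&'] from rfl, show "<".toList = ['<'] from rfl,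
    show ">".toList = ['>'] from rfl, show "\"".toList = ['"'] from rfl,
    show "'".toList = ['\''] from rfl, replace_single]
  exact chain_eq t.toList

lemma join_empty_sep : ∀ (l : List (List Char)), PySem.Chars.join [] l = l.flatten := by
  intro l
  induction l with
  | nil => simp [PySem.Chars.join_nil]
  | cons p rest ih =>
    cases rest with
    | nil => simp [PySem.Chars.join_singleton]
    | cons q r => simpa [PySem.Chars.join_cons_cons] using ih

lemma escFast_char (c : Char) :
    (PySem.Dict.getD pvEscDict c (String.ofList [c])).toList = pvEscChar c := by
  by_cases h1 : c = '&'
  · subst h1; decide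
  by_cases h2 : c = '<'
  · subst h2; decide
  by_cases h3 : c = '>'
  · subst h3; decide
  by_cases h4 : c = '"'
  · subst h4; decide
  by_cases h5 : c = '\''
  · subst h5; decide
  have g1 : (('&' : Char) == c) = false := beq_eq_false_iff_ne.mpr (fun e => h1 e.symm)
  have g2 : (('<' : Char) == c) = false := beq_eq_false_iff_ne.mpr (fun e => h2 e.symm)
  have g3 : (('>' : Char) == c) = false := beq_eq_false_iff_ne.mpr (fun e => h3 e.symm)
  have g4 : (('"' : Char) == c) = false := beq_eq_false_iff_ne.mpr (fun e => h4 e.symm)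
  have g5 : (('\'' : Char) == c) = false := beq_eq_false_iff_ne.mpr (fun e => h5 e.symm)
  simp [PySem.Dict.getD, PySem.Dict.get?, pvEscDict, pvEscChar, List.find?,
        g1, g2, g3, g4, g5, h1, h2, h3, h4, h5]

lemma escFast_toList (t : String) :
    (pvEscapeHtmlFast t).toList = t.toList.flatMap pvEscChar := by
  simp only [pvEscapeHtmlFast, PySem.Str.toList_join, show "".toList = ([] : List Char) from rfl,
        join_empty_sep, List.map_map, List.flatMap_def]
  congr 1
  exact List.map_congr_left (fun c _ => escFast_char c)

lemma esc_eq : pvEscapeHtml = pvEscapeHtmlFast := by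
  funext t
  rw [← String.toList_inj, escA_toList, escFast_toList]

-- ===== VERDICT (by name: the statement is the Claim_ definition above) =====
theorem generate_tab_buttons_spec : Claim_equal_generate_tab_buttons := by
  intro doc_ids titles _
  unfold Spec_generate_tab_buttons generate_tab_buttons generate_tab_buttons_alt
  rw [show (fun (acc : List String) (x : Int × String × String) =>
        let safe_title := pvEscapeHtml x.2.2
        let active_class := if x.1 = 0 then " active" else ""
        acc ++ ["<button class=\"tab-btn" ++ active_class ++ "\" data-doc-id=\"" ++ x.2.1
                ++ "\" aria-selected=\"" ++ (if x.1 = 0 then "true" else "false") ++ "\">"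
                ++ safe_title ++ "</button>"])
      = (fun acc x => acc ++ [(fun (x : Int × String × String) =>
          "<button class=\"tab-btn" ++ (if x.1 = 0 then " active" else "") ++ "\" data-doc-id=\"" ++ x.2.1
            ++ "\" aria-selected=\"" ++ (if x.1 = 0 then "true" else "false") ++ "\">"
            ++ pvEscapeHtml x.2.2 ++ "</button>") x]) from rfl,
      PySem.List.foldl_append_singleton_eq_map, esc_eq]
  simp
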